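-- pv_equiv track=rewrite | github.com/jaosherlyr/fb-group-scraper | scrapePosts_firefox.py | detect_url_col
-- ===== SOURCE A (Python) =====
-- def detect_url_col(fields):
--     if not fields: return None
--     cleaned=[(f or "").strip().lower() for f in fields]
--     for want in ("post url","post_url","url","link"):
--         if want in cleaned: return fields[cleaned.index(want)]
--     for i,c in enumerate(cleaned):
--         if "url" in c: return fields[i]
--     return fields[0]
-- ===== SOURCE B (Python) =====
-- def detect_url_col(fields):
--     best = None
--     best_r = 6
--     for f in reversed(fields):
--         c = f.strip().lower()
--         if c == "post url": r = 0
--         elif c == "post_url": r = 1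
--         elif c == "url": r = 2
--         elif c == "link": r = 3
--         elif "url" in c: r = 4
--         else: r = 5
--         if r <= best_r:
--             best, best_r = f, r
--     return best
-- ===== Notes on version B (the rewrite author's own statement) =====
-- stated objective: alternative
-- what changed: Replaces A's five sequential scans (four membership+index passes plus a substring pass) by a single reverse pass that assigns each field a priority rank and keeps the minimal-rank field (<= on the reverse pass makes the earliest field win ties).
import Mathlib
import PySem

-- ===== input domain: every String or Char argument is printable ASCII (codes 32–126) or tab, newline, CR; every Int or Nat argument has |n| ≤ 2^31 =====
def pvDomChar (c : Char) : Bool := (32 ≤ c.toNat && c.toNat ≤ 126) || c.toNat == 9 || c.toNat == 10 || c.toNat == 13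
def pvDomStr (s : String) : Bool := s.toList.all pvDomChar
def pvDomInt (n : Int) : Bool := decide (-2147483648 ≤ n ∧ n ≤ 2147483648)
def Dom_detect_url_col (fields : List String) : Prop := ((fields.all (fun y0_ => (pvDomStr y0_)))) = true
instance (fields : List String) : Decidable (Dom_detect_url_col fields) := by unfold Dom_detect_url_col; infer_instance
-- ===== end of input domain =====

-- B replaces A's sequential membership/index scans by one rank-minimizing reverse pass (alternative decomposition, same results).


-- ===== PORT A =====
-- (f or "").strip().lower(); on String inputs 'f or ""' is the identity for our domain ('' or "" = "")
def cleanf (f : String) : String := PySem.Str.lower (PySem.Str.strip f)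

-- 'for want in (...): if want in cleaned: return fields[cleaned.index(want)]'
def aWantLoop (fields cleaned : List String) : List String → Option String
  | [] => none
  | w :: ws =>
    match PySem.List.index? cleaned w with
    | some i => PySem.List.pyGet? fields (i : Int)
    | none => aWantLoop fields cleaned ws

-- 'for i, c in enumerate(cleaned): if "url" in c: return fields[i]' (pairs fields[i] with c)
def aUrlLoop : List (String × String) → Option String
  | [] => none
  | (f, c) :: rest => if PySem.Str.isIn "url" c then some f else aUrlLoop rest

def detect_url_col (fields : List String) : Option String :=
  if fields = [] then none
  else
    let cleaned := fields.map cleanf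
    match aWantLoop fields cleaned ["post url", "post_url", "url", "link"] with
    | some r => some r
    | none =>
      match aUrlLoop (fields.zip cleaned) with
      | some r => some r
      | none => PySem.List.pyGet? fields 0

-- ===== PORT B =====
def rankOf (c : String) : Nat :=
  if c = "post url" then 0
  else if c = "post_url" then 1
  else if c = "url" then 2
  else if c = "link" then 3
  else if PySem.Str.isIn "url" c then 4
  else 5

-- the reverse 'for f in reversed(fields)' loop, as structural recursion (foldr = backward loop)
def altGo : List String → Option String × Nat
  | [] => (none, 6)
  | f :: rest =>
    let br := altGo rest
    let r := rankOf (PySem.Str.lower (PySem.Str.strip f))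
    if r ≤ br.2 then (some f, r) else br

def detect_url_col_alt (fields : List String) : Option String := (altGo fields).1

-- ===== PRECONDITION & SPEC =====
def Spec_detect_url_col (fields : List String) (out : Option String) : Prop := out = detect_url_col_alt fields
instance (fields : List String) (out : Option String) : Decidable (Spec_detect_url_col fields out) := by unfold Spec_detect_url_col; infer_instance

-- ===== CLAIM (what is proved, stated in full; the proofs are below) =====
def Claim_equal_detect_url_col : Prop := ∀ (fields : List String), Dom_detect_url_col fields → Spec_detect_url_col fields (detect_url_col fields)

-- ===== LEMMAS AND PROOFS =====

def rankF (f : String) : Nat := rankOf (cleanf f)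

def minR : List String → Nat
  | [] => 6
  | f :: t => min (rankF f) (minR t)

theorem rankF_le5 (f : String) : rankF f ≤ 5 := by
  unfold rankF rankOf; split_ifs <;> omega

theorem minR_le (l : List String) {f : String} (hf : f ∈ l) : minR l ≤ rankF f := by
  induction l with
  | nil => cases hf
  | cons a t ih =>
    rcases List.mem_cons.mp hf with rfl | h
    · exact min_le_left _ _
    · exact le_trans (min_le_right _ _) (ih h)

theorem minR_attained (l : List String) (hl : l ≠ []) : ∃ f ∈ l, rankF f = minR l := by
  induction l with
  | nil => exact absurd rfl hl
  | cons a t ih =>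
    by_cases ht : t = []
    · subst ht
      refine ⟨a, List.mem_cons_self, ?_⟩
      have := rankF_le5 a
      simp [minR]; omega
    · obtain ⟨g, hg, hgm⟩ := ih ht
      rcases le_total (rankF a) (minR t) with h | h
      · exact ⟨a, List.mem_cons_self, by simp [minR]; omega⟩
      · refine ⟨g, List.mem_cons_of_mem _ hg, ?_⟩
        simp [minR]; omega

theorem altGo_eq (l : List String) :
    altGo l = (l.find? (fun f => rankF f == minR l), minR l) := by
  induction l with
  | nil => simp [altGo, minR]
  | cons a t ih =>
    have hr : rankOf (PySem.Str.lower (PySem.Str.strip a)) = rankF a := rfl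
    by_cases h : rankF a ≤ minR t
    · have hm : minR (a :: t) = rankF a := by simp [minR]; omega
      simp only [altGo, ih, hr, if_pos h, hm, List.find?_cons, beq_self_eq_true]
    · have hm : minR (a :: t) = minR t := by simp [minR]; omega
      have hb : (rankF a == minR t) = false := by simp; omega
      simp only [altGo, ih, hr, if_neg h, hm, List.find?_cons, hb]

theorem find?_congr_mem {α : Type} (l : List α) (p q : α → Bool)
    (h : ∀ a ∈ l, p a = q a) : l.find? p = l.find? q := by
  induction l with
  | nil => rfl
  | cons a t ih =>
    rw [List.find?_cons, List.find?_cons, h a List.mem_cons_self,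
      ih (fun b hb => h b (List.mem_cons_of_mem _ hb))]

theorem index_get (l : List String) (w : String) :
    (match PySem.List.index? (l.map cleanf) w with
      | some i => PySem.List.pyGet? l (i : Int)
      | none => (none : Option String)) = l.find? (fun f => cleanf f == w) := by
  induction l with
  | nil => simp [PySem.List.index?]
  | cons a t ih =>
    by_cases h : cleanf a = w
    · subst h
      rw [show (a :: t).map cleanf = cleanf a :: t.map cleanf from rfl,
        PySem.List.index?_cons_self]
      simp
    · rw [show (a :: t).map cleanf = cleanf a :: t.map cleanf from rfl,
        PySem.List.index?_cons_of_ne _ h]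
      rw [List.find?_cons]
      have hb : (cleanf a == w) = false := by simpa using h
      rw [hb]
      cases hidx : PySem.List.index? (t.map cleanf) w with
      | none =>
        rw [hidx] at ih
        exact ih
      | some i =>
        rw [← ih, hidx]
        show PySem.List.pyGet? (a :: t) (((i + 1 : Nat)) : Int) = PySem.List.pyGet? t ((i : Nat) : Int)
        rw [PySem.List.pyGet?_natCast, PySem.List.pyGet?_natCast]
        simp

theorem aUrlLoop_eq (l : List String) :
    aUrlLoop (l.zip (l.map cleanf)) = l.find? (fun f => PySem.Str.isIn "url" (cleanf f)) := by
  induction l with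
  | nil => rfl
  | cons a t ih =>
    rw [show (a :: t).zip ((a :: t).map cleanf) = (a, cleanf a) :: t.zip (t.map cleanf) from rfl]
    rw [show aUrlLoop ((a, cleanf a) :: t.zip (t.map cleanf)) =
      (if PySem.Str.isIn "url" (cleanf a) then some a else aUrlLoop (t.zip (t.map cleanf))) from rfl]
    rw [ih, List.find?_cons]
    cases PySem.Str.isIn "url" (cleanf a) <;> rfl

theorem want_rank (f : String) :
    ((cleanf f == "post url") = (rankF f == 0)) ∧ ((cleanf f == "post_url") = (rankF f == 1)) ∧
    ((cleanf f == "url") = (rankF f == 2)) ∧ ((cleanf f == "link") = (rankF f == 3)) := by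
  unfold rankF rankOf
  split_ifs with h1 h2 h3 h4 h5 <;> simp_all

theorem url_rank (f : String) (h : 4 ≤ rankF f) :
    (PySem.Str.isIn "url" (cleanf f)) = (rankF f == 4) := by
  unfold rankF rankOf at h ⊢
  split_ifs at h ⊢ with h1 h2 h3 h4 h5 <;> simp_all

theorem aWantLoop_step (fields : List String) (w : String) (ws : List String) :
    aWantLoop fields (fields.map cleanf) (w :: ws) =
      (match fields.find? (fun f => cleanf f == w) with
        | some r => some r
        | none => aWantLoop fields (fields.map cleanf) ws) := by
  rw [aWantLoop]
  cases hidx : PySem.List.index? (fields.map cleanf) w with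
  | none =>
    have hfind := index_get fields w
    rw [hidx] at hfind
    rw [← hfind]
  | some i =>
    have hfind := index_get fields w
    rw [hidx] at hfind
    obtain ⟨hk, -, -⟩ := PySem.List.getElem_of_index?_eq_some hidx
    rw [List.length_map] at hk
    rw [← hfind]
    show PySem.List.pyGet? fields ((i : Nat) : Int) =
      (match PySem.List.pyGet? fields ((i : Nat) : Int) with
        | some r => some r
        | none => aWantLoop fields (fields.map cleanf) ws)
    rw [PySem.List.pyGet?_natCast, List.getElem?_eq_getElem hk]

theorem find?_rank_none (fields : List String) (k : Nat) (hk : k < minR fields) :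
    fields.find? (fun f => rankF f == k) = none := by
  apply List.find?_eq_none.mpr
  intro f hf
  have := minR_le fields hf
  simp; omega

theorem find?_rank_some (fields : List String) (g : String) (hg : g ∈ fields)
    (hgm : rankF g = minR fields) :
    ∃ r, fields.find? (fun f => rankF f == minR fields) = some r := by
  have : (fields.find? (fun f => rankF f == minR fields)).isSome := by
    rw [List.find?_isSome]
    exact ⟨g, hg, by simp [hgm]⟩
  exact Option.isSome_iff_exists.mp this

-- ===== VERDICT (by name: the statement is the Claim_ definition above) =====
theorem detect_url_col_spec : Claim_equal_detect_url_col := by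
  intro fields _
  unfold Spec_detect_url_col detect_url_col_alt
  rw [altGo_eq]
  by_cases hnil : fields = []
  · subst hnil; simp [detect_url_col]
  · rw [show detect_url_col fields =
        (match aWantLoop fields (fields.map cleanf) ["post url", "post_url", "url", "link"] with
          | some r => some r
          | none =>
            match aUrlLoop (fields.zip (fields.map cleanf)) with
            | some r => some r
            | none => PySem.List.pyGet? fields 0) from by
      simp only [detect_url_col, if_neg hnil]]
    rw [aWantLoop_step, aWantLoop_step, aWantLoop_step, aWantLoop_step, aUrlLoop_eq]
    rw [show (fun f => cleanf f == "post url") = (fun f => rankF f == 0) from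
      funext fun f => (want_rank f).1]
    rw [show (fun f => cleanf f == "post_url") = (fun f => rankF f == 1) from
      funext fun f => (want_rank f).2.1]
    rw [show (fun f => cleanf f == "url") = (fun f => rankF f == 2) from
      funext fun f => (want_rank f).2.2.1]
    rw [show (fun f => cleanf f == "link") = (fun f => rankF f == 3) from
      funext fun f => (want_rank f).2.2.2]
    rw [show aWantLoop fields (fields.map cleanf) [] = none from rfl]
    obtain ⟨g, hg, hgm⟩ := minR_attained fields hnil
    have hm5 : minR fields ≤ 5 := hgm ▸ rankF_le5 g
    have hcase : minR fields = 0 ∨ minR fields = 1 ∨ minR fields = 2 ∨ minR fields = 3 ∨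
        minR fields = 4 ∨ minR fields = 5 := by omega
    rcases hcase with hm | hm | hm | hm | hm | hm
    · obtain ⟨r, hr⟩ := find?_rank_some fields g hg hgm
      rw [hm] at hr ⊢
      rw [hr]
    · obtain ⟨r, hr⟩ := find?_rank_some fields g hg hgm
      rw [hm] at hr ⊢
      rw [find?_rank_none fields 0 (by omega), hr]
    · obtain ⟨r, hr⟩ := find?_rank_some fields g hg hgm
      rw [hm] at hr ⊢
      rw [find?_rank_none fields 0 (by omega), find?_rank_none fields 1 (by omega), hr]
    · obtain ⟨r, hr⟩ := find?_rank_some fields g hg hgm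
      rw [hm] at hr ⊢
      rw [find?_rank_none fields 0 (by omega), find?_rank_none fields 1 (by omega),
        find?_rank_none fields 2 (by omega), hr]
    · obtain ⟨r, hr⟩ := find?_rank_some fields g hg hgm
      rw [hm] at hr ⊢
      rw [find?_rank_none fields 0 (by omega), find?_rank_none fields 1 (by omega),
        find?_rank_none fields 2 (by omega), find?_rank_none fields 3 (by omega)]
      rw [find?_congr_mem fields _ (fun f => rankF f == 4)
        (fun f hf => url_rank f (by have := minR_le fields hf; omega))]
      rw [hr]
    · obtain ⟨r, hr⟩ := find?_rank_some fields g hg hgm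
      rw [hm] at hr ⊢
      rw [find?_rank_none fields 0 (by omega), find?_rank_none fields 1 (by omega),
        find?_rank_none fields 2 (by omega), find?_rank_none fields 3 (by omega)]
      rw [find?_congr_mem fields _ (fun f => rankF f == 4)
        (fun f hf => url_rank f (by have := minR_le fields hf; omega))]
      rw [find?_rank_none fields 4 (by omega), hr]
      obtain ⟨a, t, rfl⟩ := List.exists_cons_of_ne_nil hnil
      have ha : rankF a == 5 := by
        have h1 := minR_le (a :: t) List.mem_cons_self
        have h2 := rankF_le5 a
        simp; omega
      rw [List.find?_cons, ha] at hr
      rw [PySem.List.pyGet?_zero]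
      simp [← hr]
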